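-- pv_equiv track=rewrite | github.com/mouredev/retos-programacion-2023 | Retos/Reto #31 - EL ÁBACO [Fácil]/python/ycanas.py | abaco
-- ===== SOURCE A (Python) =====
-- def abaco(sequence: list) -> int:
--     if not len(sequence) == 7:
--         raise Exception("Error")
--
--     output = 0
--     length = len(sequence) - 1
--
--     for index, item in enumerate(sequence):
--         if len(item) == 12 and "---" in item and item.replace("---", '') == "OOOOOOOOO":
--             number = len(item.split("---")[0])
--             output = output + (number * (10 ** length // 10 ** index))
--
--     return output
-- ===== SOURCE B (Python) =====
-- def row_digit(item):
--     if len(item) == 12 and "---" in item and item.replace("---", "") == "OOOOOOOOO":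
--         return len(item.split("---")[0])
--     return 0
--
--
-- def abaco(sequence: list) -> int:
--     if not len(sequence) == 7:
--         raise Exception("Error")
--
--     value = 0
--     for item in sequence:
--         value = 10 * value + row_digit(item)
--     return value
-- ===== Notes on version B (the rewrite author's own statement) =====
-- stated objective: simpler
-- what changed: B factors the per-row bead count into a helper returning a 0-9 digit (0 for invalid rows) and accumulates the result by Horner's rule (value = 10*value + digit), eliminating enumerate, the power table 10**length // 10**index and the skip-invalid branch from the accumulation.
import Mathlib
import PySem

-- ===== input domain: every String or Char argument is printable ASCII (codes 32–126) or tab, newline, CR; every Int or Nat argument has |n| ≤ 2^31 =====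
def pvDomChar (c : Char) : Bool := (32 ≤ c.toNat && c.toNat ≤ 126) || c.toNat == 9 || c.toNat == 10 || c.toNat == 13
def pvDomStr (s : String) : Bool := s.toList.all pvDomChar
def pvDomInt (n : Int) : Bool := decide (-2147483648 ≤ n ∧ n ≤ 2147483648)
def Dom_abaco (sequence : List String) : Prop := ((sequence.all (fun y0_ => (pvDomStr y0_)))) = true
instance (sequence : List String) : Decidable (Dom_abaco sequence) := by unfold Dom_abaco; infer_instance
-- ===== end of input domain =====

-- B replaces A's enumerate/power-table accumulation by a per-row digit helper and Horner's rule; equivalence on length-7 inputs (A raises otherwise).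

-- ===== PORT A =====
-- literal transliteration of A; on len(sequence) ≠ 7 Python raises (excluded by Pre_), the port returns 0 there
def abaco (sequence : List String) : Int :=
  if sequence.length = 7 then
    let length : Int := (sequence.length : Int) - 1
    (PySem.List.enumerate sequence).foldl
      (fun output p =>
        let index := p.1
        let item := p.2
        if PySem.Str.len item == 12 && PySem.Str.isIn "---" item
            && PySem.Str.replace item "---" "" == "OOOOOOOOO" then
          -- item.split("---")[0]: split? is some (sep ≠ ""), index 0 exists (split is nonempty)
          let number : Int := PySem.Str.len ((((PySem.Str.split? item "---").getD []).headD ""))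
          output + number * PySem.Int.floordiv ((10 : Int) ^ length.toNat) ((10 : Int) ^ index.toNat)
        else output)
      0
  else 0

-- ===== PORT B =====
def rowDigit (item : String) : Int :=
  if PySem.Str.len item == 12 && PySem.Str.isIn "---" item
      && PySem.Str.replace item "---" "" == "OOOOOOOOO" then
    PySem.Str.len ((((PySem.Str.split? item "---").getD []).headD ""))
  else 0

def abaco_alt (sequence : List String) : Int :=
  if sequence.length = 7 then
    sequence.foldl (fun value item => 10 * value + rowDigit item) 0
  else 0

-- ===== PRECONDITION & SPEC =====
-- A raises Exception("Error") whenever len(sequence) ≠ 7; exactly those inputs are excluded.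
def Pre_abaco (sequence : List String) : Prop := sequence.length = 7
instance (sequence : List String) : Decidable (Pre_abaco sequence) := by unfold Pre_abaco; infer_instance
def pvWitness_abaco : List String := ["O---OOOOOOOO", "OO---OOOOOOO", "x", "OOOOOOOOO---", "---OOOOOOOOO", "OOOOO---OOOO", "OOOOOOOOO---"]
def Spec_abaco (sequence : List String) (out : Int) : Prop := out = abaco_alt sequence
instance (sequence : List String) (out : Int) : Decidable (Spec_abaco sequence out) := by unfold Spec_abaco; infer_instance

-- ===== CLAIM (what is proved, stated in full; the proofs are below) =====
def Claim_equal_abaco : Prop := ∀ (sequence : List String), Dom_abaco sequence → Pre_abaco sequence → Spec_abaco sequence (abaco sequence)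

-- ===== LEMMAS AND PROOFS =====

theorem pvIteAdd (c : Prop) [Decidable c] (out x : Int) :
    (if c then out + x else out) = out + (if c then x else 0) := by
  split_ifs <;> simp

theorem pvIteMulZero (c : Prop) [Decidable c] (x k : Int) :
    (if c then x * k else 0) = (if c then x else 0) * k := by
  split_ifs <;> simp

-- ===== VERDICT =====
set_option maxHeartbeats 1000000 in
theorem abaco_spec : Claim_equal_abaco := by
  intro sequence _ pre
  unfold Pre_abaco at pre
  rcases sequence with _ | ⟨a, _ | ⟨b, _ | ⟨c, _ | ⟨d, _ | ⟨e, _ | ⟨f, _ | ⟨g, _ | ⟨h, t⟩⟩⟩⟩⟩⟩⟩⟩ <;>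
    simp at pre
  unfold Spec_abaco abaco abaco_alt rowDigit
  simp only [List.length_cons, List.length_nil, PySem.List.enumerate_cons,
    PySem.List.enumerate_nil, List.foldl_cons, List.foldl_nil, pvIteAdd, pvIteMulZero]
  generalize (if (PySem.Str.len a == 12 && PySem.Str.isIn "---" a && PySem.Str.replace a "---" "" == "OOOOOOOOO") = true then PySem.Str.len (((PySem.Str.split? a "---").getD []).headD "") else 0 : Int) = da
  generalize (if (PySem.Str.len b == 12 && PySem.Str.isIn "---" b && PySem.Str.replace b "---" "" == "OOOOOOOOO") = true then PySem.Str.len (((PySem.Str.split? b "---").getD []).headD "") else 0 : Int) = db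
  generalize (if (PySem.Str.len c == 12 && PySem.Str.isIn "---" c && PySem.Str.replace c "---" "" == "OOOOOOOOO") = true then PySem.Str.len (((PySem.Str.split? c "---").getD []).headD "") else 0 : Int) = dc
  generalize (if (PySem.Str.len d == 12 && PySem.Str.isIn "---" d && PySem.Str.replace d "---" "" == "OOOOOOOOO") = true then PySem.Str.len (((PySem.Str.split? d "---").getD []).headD "") else 0 : Int) = dd
  generalize (if (PySem.Str.len e == 12 && PySem.Str.isIn "---" e && PySem.Str.replace e "---" "" == "OOOOOOOOO") = true then PySem.Str.len (((PySem.Str.split? e "---").getD []).headD "") else 0 : Int) = de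
  generalize (if (PySem.Str.len f == 12 && PySem.Str.isIn "---" f && PySem.Str.replace f "---" "" == "OOOOOOOOO") = true then PySem.Str.len (((PySem.Str.split? f "---").getD []).headD "") else 0 : Int) = df
  generalize (if (PySem.Str.len g == 12 && PySem.Str.isIn "---" g && PySem.Str.replace g "---" "" == "OOOOOOOOO") = true then PySem.Str.len (((PySem.Str.split? g "---").getD []).headD "") else 0 : Int) = dg
  simp only [show ((((0:Nat)+1+1+1+1+1+1+1 : Nat) : Int) - 1).toNat = 6 from by decide,
    show (((0:Int)).toNat) = 0 from by decide, show (((0:Int)+1).toNat) = 1 from by decide, show (((0:Int)+1+1).toNat) = 2 from by decide, show (((0:Int)+1+1+1).toNat) = 3 from by decide, show (((0:Int)+1+1+1+1).toNat) = 4 from by decide, show (((0:Int)+1+1+1+1+1).toNat) = 5 from by decide, show (((0:Int)+1+1+1+1+1+1).toNat) = 6 from by decide]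
  simp only [show PySem.Int.floordiv ((10:Int) ^ (6:Nat)) ((10:Int) ^ (0:Nat)) = 1000000 from by decide,
    show PySem.Int.floordiv ((10:Int) ^ (6:Nat)) ((10:Int) ^ (1:Nat)) = 100000 from by decide,
    show PySem.Int.floordiv ((10:Int) ^ (6:Nat)) ((10:Int) ^ (2:Nat)) = 10000 from by decide,
    show PySem.Int.floordiv ((10:Int) ^ (6:Nat)) ((10:Int) ^ (3:Nat)) = 1000 from by decide,
    show PySem.Int.floordiv ((10:Int) ^ (6:Nat)) ((10:Int) ^ (4:Nat)) = 100 from by decide,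
    show PySem.Int.floordiv ((10:Int) ^ (6:Nat)) ((10:Int) ^ (5:Nat)) = 10 from by decide,
    show PySem.Int.floordiv ((10:Int) ^ (6:Nat)) ((10:Int) ^ (6:Nat)) = 1 from by decide]
  simp only [if_true]
  ring
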